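-- pv_equiv track=rewrite | github.com/kenken1270/Mirai_Flash_App | Mirai_Flash_App/flash_app.py | calc_session_xp
-- ===== SOURCE A (Python) =====
-- def calc_session_xp(results):
--     """セッションの獲得XPを計算"""
--     xp = 0
--     for r in results:
--         q = r["quality"]
--         if q >= 5:
--             xp += 10
--         elif q >= 4:
--             xp += 6
--         elif q >= 3:
--             xp += 3
--         else:
--             xp += 1
--     return xp
-- ===== SOURCE B (Python) =====
-- def calc_session_xp(results):
--     """セッションの獲得XPを計算"""
--     qs = [r["quality"] for r in results]
--     return (len(qs)
--             + 2 * sum(1 for q in qs if q >= 3)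
--             + 3 * sum(1 for q in qs if q >= 4)
--             + 4 * sum(1 for q in qs if q >= 5))
-- ===== Notes on version B (the rewrite author's own statement) =====
-- stated objective: alternative
-- what changed: Computes XP in aggregate as n + 2*count(q>=3) + 3*count(q>=4) + 4*count(q>=5) (the tier deltas), replacing A's per-record if/elif score and running accumulator; no per-record tier value is ever computed.
import Mathlib
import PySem

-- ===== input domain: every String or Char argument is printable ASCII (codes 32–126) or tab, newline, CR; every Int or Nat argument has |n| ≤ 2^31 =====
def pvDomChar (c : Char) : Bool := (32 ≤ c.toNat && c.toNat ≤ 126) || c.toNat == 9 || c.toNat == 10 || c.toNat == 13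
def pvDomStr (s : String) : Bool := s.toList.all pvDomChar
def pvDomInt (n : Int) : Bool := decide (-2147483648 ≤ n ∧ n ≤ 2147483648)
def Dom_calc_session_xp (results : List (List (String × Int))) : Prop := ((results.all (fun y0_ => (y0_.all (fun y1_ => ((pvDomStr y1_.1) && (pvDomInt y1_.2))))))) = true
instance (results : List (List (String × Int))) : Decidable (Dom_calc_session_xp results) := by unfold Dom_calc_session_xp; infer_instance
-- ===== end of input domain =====

-- B computes the XP in aggregate from three threshold counts (n + 2*#{q>=3} + 3*#{q>=4} + 4*#{q>=5})
-- instead of A's per-record if/elif score with a running accumulator (alternative; same cost).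

-- ===== PORT A =====
-- r["quality"]: first-match association-list lookup (KeyError = none, excluded by Pre_)
def pvQuality (r : List (String × Int)) : Option Int := (PySem.Dict.mk r).get? "quality"

def calc_session_xp (results : List (List (String × Int))) : Int :=
  results.foldl (fun xp r =>
    let q := (pvQuality r).getD 0
    if q ≥ 5 then xp + 10
    else if q ≥ 4 then xp + 6
    else if q ≥ 3 then xp + 3
    else xp + 1) 0

-- ===== PORT B =====
-- qs = [r["quality"] for r in results]; len + weighted threshold counts
def calc_session_xp_alt (results : List (List (String × Int))) : Int :=
  let qs : List Int := results.map (fun r => (pvQuality r).getD 0)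
  (qs.length : Int)
    + 2 * (qs.countP (fun q => q ≥ 3) : Int)
    + 3 * (qs.countP (fun q => q ≥ 4) : Int)
    + 4 * (qs.countP (fun q => q ≥ 5) : Int)

-- ===== PRECONDITION & SPEC =====
-- Pre_ excludes exactly the inputs where some result lacks the "quality" key, on which the Python A raises KeyError.
def Pre_calc_session_xp (results : List (List (String × Int))) : Prop :=
  ∀ r ∈ results, (pvQuality r).isSome = true
instance (results : List (List (String × Int))) : Decidable (Pre_calc_session_xp results) := by unfold Pre_calc_session_xp; infer_instance
def pvWitness_calc_session_xp : (List (List (String × Int))) := [[("quality", 5)], [("quality", 2)]]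

def Spec_calc_session_xp (results : List (List (String × Int))) (out : Int) : Prop := out = calc_session_xp_alt results
instance (results : List (List (String × Int))) (out : Int) : Decidable (Spec_calc_session_xp results out) := by unfold Spec_calc_session_xp; infer_instance

-- ===== CLAIM =====
def Claim_equal_calc_session_xp : Prop := ∀ (results : List (List (String × Int))), Dom_calc_session_xp results → Pre_calc_session_xp results → Spec_calc_session_xp results (calc_session_xp results)

-- ===== LEMMAS AND PROOFS =====
theorem pv_fold_shift (results : List (List (String × Int))) (acc : Int) :
    results.foldl (fun xp r =>
      let q := (pvQuality r).getD 0
      if q ≥ 5 then xp + 10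
      else if q ≥ 4 then xp + 6
      else if q ≥ 3 then xp + 3
      else xp + 1) acc
    = acc + calc_session_xp_alt results := by
  induction results generalizing acc with
  | nil => simp [calc_session_xp_alt]
  | cons r rs ih =>
    simp only [List.foldl_cons, ih, calc_session_xp_alt, List.map_cons, List.length_cons,
      List.countP_cons, decide_eq_true_eq]
    split_ifs <;> push_cast <;> omega

-- ===== VERDICT =====
theorem calc_session_xp_spec : Claim_equal_calc_session_xp := by
  intro results _ _
  unfold Spec_calc_session_xp calc_session_xp
  rw [pv_fold_shift]
  simp [calc_session_xp_alt]
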